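-- pv_equiv track=rewrite | github.com/sungminna/contingency_k | pld.py | find_in_dict
-- ===== SOURCE A (Python) =====
-- def find_in_dict(dic, target_string_list):
--     hit_list = list()
--     for key, value in dic.items():
--         for target in target_string_list:
--             hit = value.find(target)
--             if hit != -1:
--                 hit_list.append(key)
--                 break
--     return hit_list
-- ===== SOURCE B (Python) =====
-- def find_in_dict(dic, target_string_list):
--     hit = set()
--     for target in target_string_list:
--         for key, value in dic.items():
--             if key not in hit and target in value:
--                 hit.add(key)
--     return [key for key in dic if key in hit]
-- ===== Notes on version B (the rewrite author's own statement) =====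
-- stated objective: alternative
-- what changed: Loop order is inverted (targets outer, dict inner), matches are accumulated in a set, and the result is the dict's keys filtered by set membership instead of appending inside a per-key break loop.
import Mathlib
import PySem

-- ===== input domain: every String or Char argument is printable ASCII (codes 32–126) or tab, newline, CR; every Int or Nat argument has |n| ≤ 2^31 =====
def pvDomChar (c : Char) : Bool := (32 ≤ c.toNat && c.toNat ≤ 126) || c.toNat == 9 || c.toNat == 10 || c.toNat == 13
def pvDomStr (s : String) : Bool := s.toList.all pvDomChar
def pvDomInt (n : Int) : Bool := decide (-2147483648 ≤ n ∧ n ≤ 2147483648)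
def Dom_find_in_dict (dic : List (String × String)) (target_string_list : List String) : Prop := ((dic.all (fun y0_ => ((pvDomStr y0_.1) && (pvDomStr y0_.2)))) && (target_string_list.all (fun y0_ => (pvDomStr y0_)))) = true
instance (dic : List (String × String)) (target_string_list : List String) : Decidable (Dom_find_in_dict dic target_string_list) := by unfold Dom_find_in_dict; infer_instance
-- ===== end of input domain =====

-- B differs from A by inverting the loop order (targets outer, dict inner), collecting hits
-- in a set and emitting the dict's keys filtered by membership; same cost, alternative structure.
-- ===== PORT A =====
-- inner 'for target in …: hit = value.find(target); if hit != -1: hit_list.append(key); break'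
def findA_inner (value : String) (targets : List String) (key : String)
    (hit_list : List String) : List String :=
  match targets with
  | [] => hit_list
  | t :: rest =>
    if PySem.Str.find value t ≠ -1 then hit_list ++ [key]
    else findA_inner value rest key hit_list

def find_in_dict (dic : List (String × String)) (target_string_list : List String) : List String :=
  (PySem.Dict.ofList dic).items.foldl
    (fun hit_list p => findA_inner p.2 target_string_list p.1 hit_list) []

-- ===== PORT B =====
def find_in_dict_alt (dic : List (String × String)) (target_string_list : List String) : List String :=
  let items := (PySem.Dict.ofList dic).items
  let hit : PySem.Set String :=
    target_string_list.foldl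
      (fun s target =>
        items.foldl
          (fun s p =>
            if !(PySem.Set.contains s p.1) && PySem.Str.isIn target p.2 then PySem.Set.add s p.1
            else s)
          s)
      PySem.Set.empty
  (items.map Prod.fst).filter (fun key => PySem.Set.contains hit key)

-- ===== PRECONDITION & SPEC =====
def Spec_find_in_dict (dic : List (String × String)) (target_string_list : List String) (out : List String) : Prop := out = find_in_dict_alt dic target_string_list
instance (dic : List (String × String)) (target_string_list : List String) (out : List String) : Decidable (Spec_find_in_dict dic target_string_list out) := by unfold Spec_find_in_dict; infer_instance

-- ===== CLAIM (what is proved, stated in full; the proofs are below) =====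
def Claim_equal_find_in_dict : Prop := ∀ (dic : List (String × String)) (target_string_list : List String), Dom_find_in_dict dic target_string_list → Spec_find_in_dict dic target_string_list (find_in_dict dic target_string_list)

-- ===== LEMMAS AND PROOFS =====

-- the per-item predicate both programs decide: some target occurs in the value
def hitPred (targets : List String) (p : String × String) : Bool :=
  targets.any (fun t => PySem.Str.isIn t p.2)

lemma findA_inner_eq (value : String) (targets : List String) (key : String)
    (acc : List String) :
    findA_inner value targets key acc =
      if hitPred targets (key, value) then acc ++ [key] else acc := by
  induction targets with
  | nil => simp [findA_inner, hitPred]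
  | cons t rest ih =>
    simp only [findA_inner, hitPred, List.any_cons]
    by_cases h : PySem.Str.isIn t value = true
    · have hne : PySem.Str.find value t ≠ -1 :=
        (PySem.Str.find_ne_neg_one_iff value t).mpr ((PySem.Str.isIn_iff_infix t value).mp h)
      have hc : PySem.Chars.isIn t.toList value.toList = true := by simpa using h
      rw [if_pos hne]
      simp [hc]
    · have heq : PySem.Str.find value t = -1 :=
        (PySem.Str.find_eq_neg_one_iff value t).mpr
          (fun hin => h ((PySem.Str.isIn_iff_infix t value).mpr hin))
      have hc : ¬ PySem.Chars.isIn t.toList value.toList = true := by simpa using h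
      rw [if_neg (not_not_intro heq), ih]
      simp [hitPred, hc]

lemma findA_foldl_eq (items : List (String × String)) (targets : List String)
    (acc : List String) :
    items.foldl (fun hl p => findA_inner p.2 targets p.1 hl) acc =
      acc ++ (items.filter (hitPred targets)).map Prod.fst := by
  induction items generalizing acc with
  | nil => simp
  | cons p rest ih =>
    rw [List.foldl_cons, findA_inner_eq, ih]
    by_cases h : hitPred targets p = true
    · simp [h]
    · simp [h]

-- membership in the inner set-building fold over the items
lemma mem_inner_fold (items : List (String × String)) (t : String)
    (s : PySem.Set String) (k : String) :
    k ∈ items.foldl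
        (fun s p =>
          if !(PySem.Set.contains s p.1) && PySem.Str.isIn t p.2 then PySem.Set.add s p.1
          else s) s ↔
      k ∈ s ∨ ∃ p ∈ items, PySem.Str.isIn t p.2 = true ∧ p.1 = k := by
  induction items generalizing s with
  | nil => simp
  | cons p rest ih =>
    rw [List.foldl_cons]
    by_cases h : PySem.Str.isIn t p.2 = true
    · by_cases hm : PySem.Set.contains s p.1 = true
      · rw [if_neg (by simp only [Bool.and_eq_true, Bool.not_eq_true', hm]; simp), ih]
        constructor
        · rintro (h1 | ⟨q, hq, h2, h3⟩)
          · exact Or.inl h1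
          · exact Or.inr ⟨q, List.mem_cons_of_mem _ hq, h2, h3⟩
        · rintro (h1 | ⟨q, hq, h2, h3⟩)
          · exact Or.inl h1
          · rcases List.mem_cons.mp hq with rfl | hq
            · exact Or.inl (h3 ▸ (PySem.Set.contains_iff s q.1).mp hm)
            · exact Or.inr ⟨q, hq, h2, h3⟩
      · rw [if_pos (by simp only [Bool.and_eq_true, Bool.not_eq_true']; exact ⟨by simpa using hm, h⟩), ih]
        simp only [PySem.Set.mem_add, List.mem_cons]
        constructor
        · rintro (⟨h1 | h1⟩ | ⟨q, hq, h2, h3⟩)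
          · exact Or.inl h1
          · exact Or.inr ⟨p, Or.inl rfl, h, h1.symm⟩
          · exact Or.inr ⟨q, Or.inr hq, h2, h3⟩
        · rintro (h1 | ⟨q, hq, h2, h3⟩)
          · exact Or.inl (Or.inl h1)
          · rcases hq with rfl | hq
            · exact Or.inl (Or.inr h3.symm)
            · exact Or.inr ⟨q, hq, h2, h3⟩
    · rw [if_neg (by simp only [Bool.and_eq_true]; exact fun hx => h hx.2), ih]
      constructor
      · rintro (h1 | ⟨q, hq, h2, h3⟩)
        · exact Or.inl h1
        · exact Or.inr ⟨q, List.mem_cons_of_mem _ hq, h2, h3⟩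
      · rintro (h1 | ⟨q, hq, h2, h3⟩)
        · exact Or.inl h1
        · rcases List.mem_cons.mp hq with rfl | hq
          · exact absurd h2 h
          · exact Or.inr ⟨q, hq, h2, h3⟩

-- membership in B's whole hit set
lemma mem_hit_set (items : List (String × String)) (targets : List String) (k : String) :
    k ∈ targets.foldl
        (fun s t =>
          items.foldl
            (fun s p =>
              if !(PySem.Set.contains s p.1) && PySem.Str.isIn t p.2 then PySem.Set.add s p.1
              else s)
            s)
        PySem.Set.empty ↔
      ∃ p ∈ items, hitPred targets p = true ∧ p.1 = k := by
  have main : ∀ (ts : List String) (s : PySem.Set String),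
      k ∈ ts.foldl
          (fun s t =>
            items.foldl
              (fun s p =>
                if !(PySem.Set.contains s p.1) && PySem.Str.isIn t p.2 then PySem.Set.add s p.1
                else s)
              s)
          s ↔
        k ∈ s ∨ ∃ t ∈ ts, ∃ p ∈ items, PySem.Str.isIn t p.2 = true ∧ p.1 = k := by
    intro ts
    induction ts with
    | nil => simp
    | cons t rest ih =>
      intro s
      rw [List.foldl_cons, ih, mem_inner_fold]
      constructor
      · rintro (⟨h1 | h1⟩ | ⟨t', ht', h1⟩)
        · exact Or.inl h1
        · rcases h1 with ⟨p, hp, h2, h3⟩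
          exact Or.inr ⟨t, by simp, p, hp, h2, h3⟩
        · exact Or.inr ⟨t', List.mem_cons_of_mem _ ht', h1⟩
      · rintro (h1 | ⟨t', ht', h1⟩)
        · exact Or.inl (Or.inl h1)
        · rcases List.mem_cons.mp ht' with rfl | ht'
          · exact Or.inl (Or.inr h1)
          · exact Or.inr ⟨t', ht', h1⟩
  rw [main]
  simp only [PySem.Set.empty, List.not_mem_nil, false_or]
  constructor
  · rintro ⟨t, ht, p, hp, h2, h3⟩
    refine ⟨p, hp, ?_, h3⟩
    simp only [hitPred, List.any_eq_true]
    exact ⟨t, ht, h2⟩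
  · rintro ⟨p, hp, h2, h3⟩
    simp only [hitPred, List.any_eq_true] at h2
    rcases h2 with ⟨t, ht, h2⟩
    exact ⟨t, ht, p, hp, h2, h3⟩

theorem find_in_dict_spec : Claim_equal_find_in_dict := by
  intro dic targets _
  unfold Spec_find_in_dict find_in_dict find_in_dict_alt
  rw [findA_foldl_eq]
  set items := (PySem.Dict.ofList dic).items with hitems
  have hnodup : (items.map Prod.fst).Nodup := by
    have := PySem.Dict.nodup_keys_ofList (ps := dic) (κ := String) (ν := String)
    simpa [PySem.Dict.keys, hitems] using this
  have hinj := List.inj_on_of_nodup_map hnodup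
  simp only [List.nil_append]
  rw [List.filter_map]
  refine congrArg _ (List.filter_congr ?_).symm
  intro p hp
  rw [Bool.eq_iff_iff]
  simp only [Function.comp, PySem.Set.contains_iff, mem_hit_set]
  constructor
  · rintro ⟨q, hq, h2, h3⟩
    have : q = p := hinj hq hp h3
    rwa [this] at h2
  · intro h
    exact ⟨p, hp, h, rfl⟩
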